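-- pv_equiv track=rewrite | github.com/adhikaridev/python_assignment_II | 10_camel_snake_kebab.py | to_snake_or_kebab
-- ===== SOURCE A (Python) =====
-- def to_snake_or_kebab(camel, separator):
--     converted = ""
--     start = 0
--     for i in range(1, len(camel), 1):
--         if camel[i].isupper():
--             converted = converted + camel[start:i] + separator
--             start = i
--     converted = converted + camel[start:]
--     return converted.lower()
-- ===== SOURCE B (Python) =====
-- def to_snake_or_kebab(camel, separator):
--     out = []
--     for i, c in enumerate(camel):
--         if i > 0 and c.isupper():
--             out.append(separator)
--         out.append(c)
--     return ''.join(out).lower()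
-- ===== Notes on version B (the rewrite author's own statement) =====
-- stated objective: idiomatic
-- what changed: Replaces A's boundary-index bookkeeping and substring slicing with a single character-by-character pass that emits the separator before each non-initial uppercase character and each character itself, joining and lowering at the end.
import Mathlib
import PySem

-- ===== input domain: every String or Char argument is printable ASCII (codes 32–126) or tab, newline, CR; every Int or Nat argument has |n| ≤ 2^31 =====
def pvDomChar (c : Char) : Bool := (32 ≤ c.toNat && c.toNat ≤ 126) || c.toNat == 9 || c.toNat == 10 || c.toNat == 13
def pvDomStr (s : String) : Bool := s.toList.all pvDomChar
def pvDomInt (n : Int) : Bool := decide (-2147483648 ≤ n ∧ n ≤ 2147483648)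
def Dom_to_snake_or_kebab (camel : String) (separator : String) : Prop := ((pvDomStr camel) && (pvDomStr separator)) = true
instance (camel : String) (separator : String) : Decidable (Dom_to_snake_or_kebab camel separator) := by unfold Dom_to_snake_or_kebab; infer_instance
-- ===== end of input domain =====

-- B replaces A's boundary-index bookkeeping and substring slicing with a single
-- character-by-character pass (idiomatic; same cost).

-- ===== PORT A =====
def to_snake_or_kebab (camel : String) (separator : String) : String :=
  let cs := camel.toList
  let sep := separator.toList
  -- for i in range(1, len(camel), 1): if camel[i].isupper(): converted += camel[start:i] + separator; start = i
  -- (i is always in range, so camel[i] is ported with pyGetD)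
  let r := (PySem.List.pyRange 1 (cs.length : Int) 1).foldl
      (fun (p : List Char × Int) i =>
        if PySem.Chars.isupper (PySem.List.pyGetD cs i ' ') then
          (p.1 ++ PySem.List.slice cs (some p.2) (some i) ++ sep, i)
        else p)
      ([], 0)
  -- converted = converted + camel[start:]; return converted.lower()
  String.ofList (PySem.Chars.lower (r.1 ++ PySem.List.slice cs (some r.2) none))

-- ===== PORT B =====
def to_snake_or_kebab_alt (camel : String) (separator : String) : String :=
  let out := (PySem.List.enumerate camel.toList 0).foldl
      (fun (out : List (List Char)) p =>
        (if decide (0 < p.1) && PySem.Chars.isupper p.2 then out ++ [separator.toList] else out)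
          ++ [[p.2]])
      []
  String.ofList (PySem.Chars.lower out.flatten)

-- ===== PRECONDITION & SPEC =====
def Spec_to_snake_or_kebab (camel : String) (separator : String) (out : String) : Prop := out = to_snake_or_kebab_alt camel separator
instance (camel : String) (separator : String) (out : String) : Decidable (Spec_to_snake_or_kebab camel separator out) := by unfold Spec_to_snake_or_kebab; infer_instance

-- ===== CLAIM (what is proved, stated in full; the proofs are below) =====
def Claim_equal_to_snake_or_kebab : Prop := ∀ (camel : String) (separator : String), Dom_to_snake_or_kebab camel separator → Spec_to_snake_or_kebab camel separator (to_snake_or_kebab camel separator)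

-- ===== LEMMAS AND PROOFS =====

-- the per-character emission both programs produce for indices ≥ 1
def pvEmit (sep : List Char) (l : List Char) : List Char :=
  l.flatMap (fun c => (if PySem.Chars.isupper c then sep else []) ++ [c])

theorem pvB_fold (sep : List Char) (l : List Char) (s : Int) (hs : 1 ≤ s)
    (acc : List (List Char)) :
    ((PySem.List.enumerate l s).foldl
      (fun (out : List (List Char)) p =>
        (if decide (0 < p.1) && PySem.Chars.isupper p.2 then out ++ [sep] else out)
          ++ [[p.2]]) acc).flatten = acc.flatten ++ pvEmit sep l := by
  induction l generalizing s acc with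
  | nil => simp [PySem.List.enumerate_nil, pvEmit]
  | cons c t ih =>
      rw [PySem.List.enumerate_cons, List.foldl_cons, ih (s + 1) (by omega)]
      have h0 : decide (0 < s) = true := by simp; omega
      simp only [h0, Bool.true_and, pvEmit, List.flatMap_cons]
      by_cases hu : PySem.Chars.isupper c = true <;> simp [hu]

theorem pvA_loop (cs sep : List Char) (k start : Nat) (conv : List Char)
    (hs : start ≤ k) (hk : k ≤ cs.length) :
    ((PySem.List.pyRange (k : Int) (cs.length : Int) 1).foldl
        (fun (p : List Char × Int) i =>
          if PySem.Chars.isupper (PySem.List.pyGetD cs i ' ') then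
            (p.1 ++ PySem.List.slice cs (some p.2) (some i) ++ sep, i)
          else p)
        (conv, (start : Int))).1
      ++ PySem.List.slice cs
        (some ((PySem.List.pyRange (k : Int) (cs.length : Int) 1).foldl
          (fun (p : List Char × Int) i =>
            if PySem.Chars.isupper (PySem.List.pyGetD cs i ' ') then
              (p.1 ++ PySem.List.slice cs (some p.2) (some i) ++ sep, i)
            else p)
          (conv, (start : Int))).2) none
    = conv ++ (cs.drop start).take (k - start) ++ pvEmit sep (cs.drop k) := by
  induction hgen : cs.length - k generalizing k start conv with
  | zero =>
      have hk' : k = cs.length := by omega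
      rw [PySem.List.pyRange_one_eq_nil (by omega)]
      simp only [List.foldl_nil]
      rw [PySem.List.slice_from_natCast]
      subst hk'
      have ht : List.take (cs.length - start) (List.drop start cs) = List.drop start cs :=
        List.take_of_length_le (by simp)
      simp [pvEmit, ht]
  | succ m ih =>
      have hlt : k < cs.length := by omega
      rw [PySem.List.pyRange_one_cons (by exact_mod_cast hlt)]
      simp only [List.foldl_cons]
      have hget : PySem.List.pyGetD cs (k : Int) ' ' = cs[k] := by
        rw [PySem.List.pyGetD_natCast]; simp [hlt]
      have hdk : List.drop k cs = cs[k] :: List.drop (k + 1) cs := by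
        exact List.drop_eq_getElem_cons hlt
      have hcast : ((k : Int) + 1) = ((k + 1 : Nat) : Int) := by push_cast; ring
      by_cases hu : PySem.Chars.isupper cs[k] = true
      · rw [hget, if_pos hu, hcast,
          ih (k + 1) k (conv ++ PySem.List.slice cs (some (start : Int)) (some (k : Int)) ++ sep)
            (by omega) (by omega) (by omega)]
        rw [PySem.List.slice_natCast, hdk]
        have h1 : k + 1 - k = 1 := by omega
        rw [h1]
        simp only [pvEmit, List.flatMap_cons, hu, if_true, List.take_succ_cons,
          List.take_zero, List.append_assoc, List.cons_append, List.nil_append]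
      · rw [hget, if_neg hu, hcast, ih (k + 1) start conv (by omega) (by omega) (by omega)]
        rw [hdk]
        have htake : (cs.drop start).take (k + 1 - start)
            = (cs.drop start).take (k - start) ++ [cs[k]] := by
          have h2 : k + 1 - start = (k - start) + 1 := by omega
          rw [h2, List.take_add_one]
          have hg : (cs.drop start)[k - start]? = some cs[k] := by
            rw [List.getElem?_drop, List.getElem?_eq_getElem (by omega)]
            congr 1; congr 1; omega
          simp [hg]
        rw [htake]
        simp only [pvEmit, List.flatMap_cons, hu, Bool.false_eq_true, if_false,
          List.append_assoc, List.cons_append, List.nil_append]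

-- ===== VERDICT (by name: the statement is the Claim_ definition above) =====
theorem to_snake_or_kebab_spec : Claim_equal_to_snake_or_kebab := by
  intro camel separator _
  show to_snake_or_kebab camel separator = to_snake_or_kebab_alt camel separator
  simp only [to_snake_or_kebab, to_snake_or_kebab_alt]
  cases hcs : camel.toList with
  | nil => simp [PySem.List.pyRange_one_eq_nil, PySem.List.enumerate_nil, PySem.List.slice]
  | cons c t =>
      have hA := pvA_loop (c :: t) separator.toList 1 0 [] (by omega) (by simp)
      simp only [Nat.cast_one, Nat.cast_zero] at hA
      rw [hA, PySem.List.enumerate_cons, List.foldl_cons]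
      have hB := pvB_fold separator.toList t 1 (by omega) [[c]]
      norm_num at hB ⊢
      rw [hB]
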